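-- pv_equiv track=rewrite | github.com/GabrBenjamin/multi-agent-debate-for-architectural-decisions | MAD_RAG/count.py | count_yes_no_maybe
-- ===== SOURCE A (Python) =====
-- def count_yes_no_maybe(data, column_name):
--     # Initialize lists to store the strings
--     no_list = []
--     yes_list = []
--     maybe_list = []
--
--     # Loop through the column to categorize the entries
--     for entry in data[column_name]:
--         # Extract the main string (e.g., "No", "Yes", "Maybe") before any additional text
--         cleaned_entry = entry.split('//')[0].strip()
--
--         if "No" in cleaned_entry:
--             no_list.append(cleaned_entry)
--         elif "Yes" in cleaned_entry:
--             yes_list.append(cleaned_entry)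
--         elif "Maybe" in cleaned_entry:
--             maybe_list.append(cleaned_entry)
--
--     # Return counts and the lists
--     return len(no_list), len(yes_list), len(maybe_list), no_list, yes_list, maybe_list
-- ===== SOURCE B (Python) =====
-- def count_yes_no_maybe(data, column_name):
--     # Recursive back-to-front build with a table-driven classifier:
--     # each entry is mapped to the index of the first matching keyword
--     # (priority = order of KEYWORDS), and the recursion prepends the
--     # cleaned entry to the selected group.
--     KEYWORDS = ("No", "Yes", "Maybe")
--
--     def classify(entry):
--         c = entry.split('//')[0].strip()
--         k = next((i for i, w in enumerate(KEYWORDS) if w in c), None)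
--         return c, k
--
--     def go(entries):
--         if not entries:
--             return ([], [], [])
--         c, k = classify(entries[0])
--         groups = go(entries[1:])
--         return tuple([c] + g if i == k else g for i, g in enumerate(groups))
--
--     no_list, yes_list, maybe_list = go(list(data[column_name]))
--     return len(no_list), len(yes_list), len(maybe_list), no_list, yes_list, maybe_list
-- ===== Notes on version B (the rewrite author's own statement) =====
-- stated objective: alternative
-- what changed: Replaces A's forward accumulation loop with three elif branches by a tail-of-list recursion that builds the groups back-to-front via prepends, dispatching each entry through a table-driven classifier that scans a keyword tuple for the first match instead of hard-coded branches.
import Mathlib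
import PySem

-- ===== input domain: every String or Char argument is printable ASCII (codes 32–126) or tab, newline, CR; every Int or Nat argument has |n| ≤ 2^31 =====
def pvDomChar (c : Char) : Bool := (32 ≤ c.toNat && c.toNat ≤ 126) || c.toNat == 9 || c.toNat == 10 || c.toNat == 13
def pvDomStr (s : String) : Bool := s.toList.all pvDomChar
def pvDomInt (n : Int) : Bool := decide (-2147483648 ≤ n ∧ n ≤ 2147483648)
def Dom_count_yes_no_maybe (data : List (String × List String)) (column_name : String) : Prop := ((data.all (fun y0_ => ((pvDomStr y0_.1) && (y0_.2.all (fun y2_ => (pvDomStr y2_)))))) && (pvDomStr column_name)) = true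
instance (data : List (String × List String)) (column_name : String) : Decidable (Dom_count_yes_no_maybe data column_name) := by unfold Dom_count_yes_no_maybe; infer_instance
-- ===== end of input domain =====

-- B replaces A's forward elif-branched accumulation loop by a back-to-front
-- recursion with a table-driven keyword classifier (objective: alternative).

-- shared helper: entry.split('//')[0].strip()  (split with a nonempty separator
-- is never empty, so the [0] never raises; exact via PySem.Str)
def pvClean (e : String) : String :=
  PySem.Str.strip (((PySem.Str.split? e "//").getD []).headD "")

-- data[column_name]: first matching key (dict lookup); Pre_ guarantees a match
def pvCol (data : List (String × List String)) (column_name : String) : List String :=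
  ((data.find? (fun p => p.1 == column_name)).getD (column_name, [])).2

-- ===== PORT A =====
def count_yes_no_maybe (data : List (String × List String)) (column_name : String) : Int × Int × Int × List String × List String × List String :=
  let r := (pvCol data column_name).foldl (fun acc entry =>
    let c := pvClean entry
    if PySem.Str.isIn "No" c then (acc.1 ++ [c], acc.2.1, acc.2.2)
    else if PySem.Str.isIn "Yes" c then (acc.1, acc.2.1 ++ [c], acc.2.2)
    else if PySem.Str.isIn "Maybe" c then (acc.1, acc.2.1, acc.2.2 ++ [c])
    else acc) (([] : List String), ([] : List String), ([] : List String))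
  ((r.1.length : Int), (r.2.1.length : Int), (r.2.2.length : Int), r.1, r.2.1, r.2.2)

-- ===== PORT B =====
-- KEYWORDS = ("No", "Yes", "Maybe")
def pvKeywords : List String := ["No", "Yes", "Maybe"]

-- classify(entry): cleaned entry and index of first keyword contained in it
def pvClassify (e : String) : String × Option Int :=
  let c := pvClean e
  (c, ((PySem.List.enumerate pvKeywords).find? (fun p => PySem.Str.isIn p.2 c)).map (·.1))

-- go(entries): recursion on the tail, prepending to the group selected by the index
def pvGo : List String → List String × List String × List String
  | [] => ([], [], [])
  | e :: rest =>
    let ck := pvClassify e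
    let g := pvGo rest
    ((if ck.2 = some 0 then ck.1 :: g.1 else g.1),
     (if ck.2 = some 1 then ck.1 :: g.2.1 else g.2.1),
     (if ck.2 = some 2 then ck.1 :: g.2.2 else g.2.2))

def count_yes_no_maybe_alt (data : List (String × List String)) (column_name : String) : Int × Int × Int × List String × List String × List String :=
  let g := pvGo (pvCol data column_name)
  ((g.1.length : Int), (g.2.1.length : Int), (g.2.2.length : Int), g.1, g.2.1, g.2.2)

-- ===== PRECONDITION & SPEC =====
-- A raises KeyError when column_name is not a key of data; excluded here.
def Pre_count_yes_no_maybe (data : List (String × List String)) (column_name : String) : Prop :=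
  column_name ∈ data.map Prod.fst
instance (data : List (String × List String)) (column_name : String) : Decidable (Pre_count_yes_no_maybe data column_name) := by unfold Pre_count_yes_no_maybe; infer_instance
def pvWitness_count_yes_no_maybe : (List (String × List String)) × String := ([("c", ["Yes // ok", "No"])], "c")

def Spec_count_yes_no_maybe (data : List (String × List String)) (column_name : String) (out : Int × Int × Int × List String × List String × List String) : Prop := out = count_yes_no_maybe_alt data column_name
instance (data : List (String × List String)) (column_name : String) (out : Int × Int × Int × List String × List String × List String) : Decidable (Spec_count_yes_no_maybe data column_name out) := by unfold Spec_count_yes_no_maybe; infer_instance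

-- ===== CLAIM =====
def Claim_equal_count_yes_no_maybe : Prop := ∀ (data : List (String × List String)) (column_name : String), Dom_count_yes_no_maybe data column_name → Pre_count_yes_no_maybe data column_name → Spec_count_yes_no_maybe data column_name (count_yes_no_maybe data column_name)

-- ===== LEMMAS AND PROOFS =====

-- B's classifier index, case-split into the three containment flags
theorem pv_classify_eq (e : String) :
    pvClassify e = (pvClean e,
      if PySem.Str.isIn "No" (pvClean e) then some 0
      else if PySem.Str.isIn "Yes" (pvClean e) then some 1
      else if PySem.Str.isIn "Maybe" (pvClean e) then some 2
      else none) := by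
  unfold pvClassify pvKeywords
  simp only [PySem.List.enumerate_cons, PySem.List.enumerate_nil, List.find?]
  cases hNo : PySem.Str.isIn "No" (pvClean e) <;>
    cases hYes : PySem.Str.isIn "Yes" (pvClean e) <;>
      cases hMay : PySem.Str.isIn "Maybe" (pvClean e) <;>
        simp [hNo, hYes, hMay]

-- both programs compute the three priority-filtered lists of cleaned entries
def pvFilt (l : List String) : List String × List String × List String :=
  ((l.map pvClean).filter (fun x => PySem.Str.isIn "No" x),
   (l.map pvClean).filter (fun x => PySem.Str.isIn "Yes" x && !PySem.Str.isIn "No" x),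
   (l.map pvClean).filter (fun x => PySem.Str.isIn "Maybe" x && !PySem.Str.isIn "Yes" x && !PySem.Str.isIn "No" x))

theorem pv_go_eq (l : List String) : pvGo l = pvFilt l := by
  induction l with
  | nil => simp [pvGo, pvFilt]
  | cons h t ih =>
      simp only [pvGo, ih, pv_classify_eq, pvFilt, List.map_cons, List.filter_cons]
      cases hNo : PySem.Str.isIn "No" (pvClean h) <;>
        cases hYes : PySem.Str.isIn "Yes" (pvClean h) <;>
          cases hMay : PySem.Str.isIn "Maybe" (pvClean h) <;>
            simp [hNo, hYes, hMay]

theorem pv_fold_eq (l : List String) (a b c : List String) :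
    l.foldl (fun acc entry =>
      let x := pvClean entry
      if PySem.Str.isIn "No" x then (acc.1 ++ [x], acc.2.1, acc.2.2)
      else if PySem.Str.isIn "Yes" x then (acc.1, acc.2.1 ++ [x], acc.2.2)
      else if PySem.Str.isIn "Maybe" x then (acc.1, acc.2.1, acc.2.2 ++ [x])
      else acc) (a, b, c)
    = (a ++ (pvFilt l).1, b ++ (pvFilt l).2.1, c ++ (pvFilt l).2.2) := by
  induction l generalizing a b c with
  | nil => simp [pvFilt]
  | cons h t ih =>
      simp only [List.foldl_cons, pvFilt, List.map_cons, List.filter_cons]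
      cases hNo : PySem.Str.isIn "No" (pvClean h) <;>
        cases hYes : PySem.Str.isIn "Yes" (pvClean h) <;>
          cases hMay : PySem.Str.isIn "Maybe" (pvClean h) <;>
            simp only [hNo, hYes, hMay, Bool.not_true, Bool.not_false, Bool.true_and,
              Bool.false_and, Bool.and_true, Bool.and_false, Bool.false_eq_true,
              if_true, if_false, ite_true, ite_false, ih, pvFilt, List.append_assoc,
              List.singleton_append, List.cons_append, List.nil_append]

-- ===== VERDICT =====
theorem count_yes_no_maybe_spec : Claim_equal_count_yes_no_maybe := by
  intro data column_name _ _
  unfold Spec_count_yes_no_maybe count_yes_no_maybe count_yes_no_maybe_alt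
  simp only [pv_fold_eq, pv_go_eq, List.nil_append]
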